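-- pv_equiv track=rewrite | github.com/dmpots/codejam | 2014/1A/A.py | apply_flips
-- ===== SOURCE A (Python) =====
-- def flipv(s):
--   if s == "0":
--     return "1"
--   return "0"
--
-- def apply_flips(flips, sockets):
--   results = []
--   for s in sockets:
--     res = []
--     for (i,v) in enumerate(s):
--       if i in flips:
--         res.append(flipv(v))
--       else:
--         res.append(v)
--     results.append("".join(res))
--   return results
-- ===== SOURCE B (Python) =====
-- def apply_flips(flips, sockets):
--     results = []
--     distinct = set(flips)
--     for s in sockets:
--         buf = list(s)
--         for i in distinct:
--             if 0 <= i < len(buf):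
--                 buf[i] = "1" if buf[i] == "0" else "0"
--         results.append("".join(buf))
--     return results
-- ===== Notes on version B (the rewrite author's own statement) =====
-- stated objective: alternative
-- what changed: Instead of scanning every character of every socket and testing membership in the flips list, B builds set(flips) once and mutates a char buffer only at the deduplicated, in-range flip positions.
import Mathlib
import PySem

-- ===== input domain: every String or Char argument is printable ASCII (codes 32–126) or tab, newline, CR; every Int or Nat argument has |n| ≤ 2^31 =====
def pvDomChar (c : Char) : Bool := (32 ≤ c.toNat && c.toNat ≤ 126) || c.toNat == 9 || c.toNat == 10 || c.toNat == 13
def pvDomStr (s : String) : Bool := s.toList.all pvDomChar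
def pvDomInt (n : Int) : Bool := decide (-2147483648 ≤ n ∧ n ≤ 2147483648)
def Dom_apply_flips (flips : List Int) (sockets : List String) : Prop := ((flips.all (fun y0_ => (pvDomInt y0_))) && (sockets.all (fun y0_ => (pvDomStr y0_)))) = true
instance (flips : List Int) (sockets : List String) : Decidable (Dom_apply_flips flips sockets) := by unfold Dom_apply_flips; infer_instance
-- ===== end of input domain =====

-- B loops over the deduplicated flip positions mutating a char buffer instead of
-- scanning every character with a membership test; equivalence proved on all inputs.

-- ===== PORT A =====
def flipv (c : Char) : Char := if c = '0' then '1' else '0'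

def apply_flips (flips : List Int) (sockets : List String) : List String :=
  sockets.foldl (fun results s =>
    results ++ [String.mk ((PySem.List.enumerate s.toList).foldl
      (fun res iv => if iv.1 ∈ flips then res ++ [flipv iv.2] else res ++ [iv.2]) [])]) []

-- ===== PORT B =====
-- one pass of the inner loop body: buf[i] = "1" if buf[i] == "0" else "0" (guarded)
def bufFlip (buf : List Char) (i : Int) : List Char :=
  if 0 ≤ i ∧ i < (buf.length : Int) then
    buf.set i.toNat (if buf.getD i.toNat '0' = '0' then '1' else '0')
  else buf

def apply_flips_alt (flips : List Int) (sockets : List String) : List String :=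
  let distinct := PySem.Set.ofList flips
  sockets.foldl (fun results s =>
    results ++ [String.mk (distinct.foldl bufFlip s.toList)]) []

-- ===== PRECONDITION & SPEC =====
def Spec_apply_flips (flips : List Int) (sockets : List String) (out : List String) : Prop := out = apply_flips_alt flips sockets
instance (flips : List Int) (sockets : List String) (out : List String) : Decidable (Spec_apply_flips flips sockets out) := by unfold Spec_apply_flips; infer_instance

-- ===== CLAIM (what is proved, stated in full; the proofs are below) =====
def Claim_equal_apply_flips : Prop := ∀ (flips : List Int) (sockets : List String), Dom_apply_flips flips sockets → Spec_apply_flips flips sockets (apply_flips flips sockets)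

-- ===== LEMMAS AND PROOFS =====

theorem getElem?_bufFlip (cs : List Char) (i : Int) (j : Nat) :
    (bufFlip cs i)[j]? = cs[j]?.map (fun c => if (j : Int) = i then flipv c else c) := by
  unfold bufFlip
  by_cases hv : 0 ≤ i ∧ i < (cs.length : Int)
  · rw [if_pos hv, List.getElem?_set]
    obtain ⟨h0, hlt⟩ := hv
    have hi : i.toNat < cs.length := by omega
    by_cases hij : i.toNat = j
    · subst hij
      have hji : ((i.toNat : Nat) : Int) = i := by omega
      simp [hi, hji, List.getD, flipv]
    · have hji : (j : Int) ≠ i := by omega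
      rcases h : cs[j]? with _ | c
      · simp [hij]
      · simp [hij, hji]
  · rw [if_neg hv]
    by_cases hj : j < cs.length
    · have hji : (j : Int) ≠ i := by
        intro he; apply hv; omega
      rw [List.getElem?_eq_getElem hj]
      simp [hji]
    · have h : cs[j]? = none := by
        rw [List.getElem?_eq_none_iff]; omega
      rw [h]; rfl

theorem getElem?_bufFold (L : List Int) (hnd : L.Nodup) (cs : List Char) (j : Nat) :
    (L.foldl bufFlip cs)[j]? = cs[j]?.map (fun c => if (j : Int) ∈ L then flipv c else c) := by
  induction L generalizing cs with
  | nil =>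
    rcases h : cs[j]? with _ | c <;> simp [h]
  | cons i L ih =>
    have hiL : i ∉ L := (List.nodup_cons.mp hnd).1
    have hndL : L.Nodup := (List.nodup_cons.mp hnd).2
    rw [List.foldl_cons, ih hndL (bufFlip cs i), getElem?_bufFlip]
    rcases h : cs[j]? with _ | c
    · rfl
    · simp only [Option.map_some]
      by_cases hmem : (j : Int) ∈ L
      · have hne : (j : Int) ≠ i := fun he => hiL (he ▸ hmem)
        simp [hmem, hne]
      · by_cases hji : (j : Int) = i
        · subst hji; simp [hmem]
        · simp [hmem, hji]

-- A's inner loop rewritten as a map over the enumeration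
theorem applyA_inner (flips : List Int) (cs : List Char) :
    (PySem.List.enumerate cs).foldl
      (fun res iv => if iv.1 ∈ flips then res ++ [flipv iv.2] else res ++ [iv.2]) []
    = (PySem.List.enumerate cs).map (fun iv => if iv.1 ∈ flips then flipv iv.2 else iv.2) := by
  have hf : (fun (res : List Char) (iv : Int × Char) =>
      if iv.1 ∈ flips then res ++ [flipv iv.2] else res ++ [iv.2])
      = fun res iv => res ++ [if iv.1 ∈ flips then flipv iv.2 else iv.2] := by
    funext res iv; split <;> rfl
  rw [hf, PySem.List.foldl_append_singleton_eq_map]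
  simp

-- per-socket agreement of the two inner computations
theorem inner_eq (flips : List Int) (cs : List Char) :
    (PySem.List.enumerate cs).foldl
      (fun res iv => if iv.1 ∈ flips then res ++ [flipv iv.2] else res ++ [iv.2]) []
    = (PySem.Set.ofList flips).foldl bufFlip cs := by
  rw [applyA_inner]
  apply List.ext_getElem?
  intro j
  rw [getElem?_bufFold _ (PySem.Set.nodup_ofList flips) cs j]
  rw [List.getElem?_map, PySem.List.getElem?_enumerate]
  rcases h : cs[j]? with _ | c
  · rfl
  · simp [PySem.Set.mem_ofList]

-- ===== VERDICT (by name: the statement is the Claim_ definition above) =====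
theorem apply_flips_spec : Claim_equal_apply_flips := by
  intro flips sockets _
  unfold Spec_apply_flips apply_flips apply_flips_alt
  simp only [PySem.List.foldl_append_singleton_eq_map, List.nil_append]
  refine List.map_congr_left (fun s _ => ?_)
  rw [inner_eq]
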